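-- pv_equiv track=rewrite | github.com/9578577/MSc-University-of-Liverpool | Data Mining and Visualisation/K-Means/evaluation.py | confusionMatrix
-- ===== SOURCE A (Python) =====
-- def confusionMatrix(classes, clusters):
--     n = len(classes) # Take length of our data
--
--     # Instantiate variables to hold counts
--     true_positive = false_positive = true_negative = false_negative = 0
--
--     # Loop through all pairs within our classes and clusters
--     for i in range(n):
--         for j in range(i, n):
--             if classes[i] == classes[j] and clusters[i] == clusters[j]:
--                 true_positive += 1
--             elif classes[i] != classes[j] and clusters[i] == clusters[j]:
--                 false_positive += 1
--             elif classes[i] != classes[j] and clusters[i] != clusters[j]: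
--                 true_negative += 1
--             elif classes[i] == classes[j] and clusters[i] != clusters[j]:
--                 false_negative += 1
--
--     return [true_positive, false_positive, true_negative, false_negative]
-- ===== SOURCE B (Python) =====
-- def confusionMatrix(classes, clusters):
--     # One O(n) pass: count group sizes, then get pair counts combinatorially.
--     pairs = list(zip(classes, clusters))
--     m = len(pairs)
--     pair_counts = {}
--     class_counts = {}
--     cluster_counts = {}
--     for a, b in pairs:
--         pair_counts[(a, b)] = pair_counts.get((a, b), 0) + 1
--         class_counts[a] = class_counts.get(a, 0) + 1
--         cluster_counts[b] = cluster_counts.get(b, 0) + 1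
--     tri = lambda s: s * (s + 1) // 2
--     tp = sum(tri(s) for s in pair_counts.values())
--     same_class = sum(tri(s) for s in class_counts.values())
--     same_cluster = sum(tri(s) for s in cluster_counts.values())
--     return [tp,
--             same_cluster - tp,
--             tri(m) - same_class - same_cluster + tp,
--             same_class - tp]
-- ===== Notes on version B (the rewrite author's own statement) =====
-- stated objective: faster
-- what changed: Replaces the O(n^2) double loop over all index pairs by one O(n) counting pass (dict group sizes for classes, clusters and (class,cluster) pairs) plus the triangular-number formula s*(s+1)//2 for each pair count.
import Mathlib
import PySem

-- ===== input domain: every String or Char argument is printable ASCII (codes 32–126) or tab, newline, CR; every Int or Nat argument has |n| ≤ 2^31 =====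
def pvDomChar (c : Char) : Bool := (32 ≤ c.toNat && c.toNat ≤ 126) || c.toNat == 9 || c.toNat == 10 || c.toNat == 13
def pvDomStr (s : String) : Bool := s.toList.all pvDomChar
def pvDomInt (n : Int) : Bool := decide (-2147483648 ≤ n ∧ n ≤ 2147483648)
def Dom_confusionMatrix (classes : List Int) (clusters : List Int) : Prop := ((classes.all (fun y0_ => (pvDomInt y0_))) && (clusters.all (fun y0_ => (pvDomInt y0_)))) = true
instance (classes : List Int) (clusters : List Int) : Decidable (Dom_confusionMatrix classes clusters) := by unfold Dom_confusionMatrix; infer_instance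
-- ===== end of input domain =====

-- B replaces A's O(n^2) double loop over index pairs by one counting pass over the zipped
-- lists plus the triangular-number formula s*(s+1)//2 per group (objective: faster).


-- ===== PORT A =====
def confusionMatrix (classes : List Int) (clusters : List Int) : List Int :=
  let n : Int := classes.length
  let st :=
    (PySem.List.pyRange 0 n).foldl (fun (st : Int × Int × Int × Int) i =>
      (PySem.List.pyRange i n).foldl (fun (st : Int × Int × Int × Int) j =>
        if PySem.List.pyGetD classes i 0 = PySem.List.pyGetD classes j 0 ∧
           PySem.List.pyGetD clusters i 0 = PySem.List.pyGetD clusters j 0 then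
          (st.1 + 1, st.2.1, st.2.2.1, st.2.2.2)
        else if PySem.List.pyGetD classes i 0 ≠ PySem.List.pyGetD classes j 0 ∧
                PySem.List.pyGetD clusters i 0 = PySem.List.pyGetD clusters j 0 then
          (st.1, st.2.1 + 1, st.2.2.1, st.2.2.2)
        else if PySem.List.pyGetD classes i 0 ≠ PySem.List.pyGetD classes j 0 ∧
                PySem.List.pyGetD clusters i 0 ≠ PySem.List.pyGetD clusters j 0 then
          (st.1, st.2.1, st.2.2.1 + 1, st.2.2.2)
        else if PySem.List.pyGetD classes i 0 = PySem.List.pyGetD classes j 0 ∧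
                PySem.List.pyGetD clusters i 0 ≠ PySem.List.pyGetD clusters j 0 then
          (st.1, st.2.1, st.2.2.1, st.2.2.2 + 1)
        else st) st) ((0, 0, 0, 0) : Int × Int × Int × Int)
  [st.1, st.2.1, st.2.2.1, st.2.2.2]

-- ===== PORT B =====
-- B's `tri` lambda
def pyTri (s : Int) : Int := PySem.Int.floordiv (s * (s + 1)) 2

def confusionMatrix_alt (classes : List Int) (clusters : List Int) : List Int :=
  let pairs := classes.zip clusters
  let m : Int := pairs.length
  let cnts :=
    pairs.foldl
      (fun (st : PySem.Dict (Int × Int) Int × PySem.Dict Int Int × PySem.Dict Int Int) p =>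
        (st.1.insert p (st.1.getD p 0 + 1),
         st.2.1.insert p.1 (st.2.1.getD p.1 0 + 1),
         st.2.2.insert p.2 (st.2.2.getD p.2 0 + 1)))
      (PySem.Dict.empty, PySem.Dict.empty, PySem.Dict.empty)
  let tp := (cnts.1.values.map pyTri).sum
  let sameClass := (cnts.2.1.values.map pyTri).sum
  let sameCluster := (cnts.2.2.values.map pyTri).sum
  [tp, sameCluster - tp, pyTri m - sameClass - sameCluster + tp, sameClass - tp]

-- ===== PRECONDITION & SPEC =====
-- A indexes clusters[j] for every j < len(classes), so it raises IndexError when clusters is shorter.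
def Pre_confusionMatrix (classes : List Int) (clusters : List Int) : Prop :=
  classes.length ≤ clusters.length
instance (classes : List Int) (clusters : List Int) : Decidable (Pre_confusionMatrix classes clusters) := by unfold Pre_confusionMatrix; infer_instance

def pvWitness_confusionMatrix : List Int × List Int := ([1, 2, 1], [4, 4, 5])

def Spec_confusionMatrix (classes : List Int) (clusters : List Int) (out : List Int) : Prop := out = confusionMatrix_alt classes clusters
instance (classes : List Int) (clusters : List Int) (out : List Int) : Decidable (Spec_confusionMatrix classes clusters out) := by unfold Spec_confusionMatrix; infer_instance

-- ===== CLAIM (what is proved, stated in full; the proofs are below) =====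
def Claim_equal_confusionMatrix : Prop := ∀ (classes : List Int) (clusters : List Int), Dom_confusionMatrix classes clusters → Pre_confusionMatrix classes clusters → Spec_confusionMatrix classes clusters (confusionMatrix classes clusters)
-- ===== LEMMAS AND PROOFS =====

def pvStep (x y : Int × Int) (st : Int × Int × Int × Int) : Int × Int × Int × Int :=
  if x.1 = y.1 ∧ x.2 = y.2 then (st.1 + 1, st.2.1, st.2.2.1, st.2.2.2)
  else if x.1 ≠ y.1 ∧ x.2 = y.2 then (st.1, st.2.1 + 1, st.2.2.1, st.2.2.2)
  else if x.1 ≠ y.1 ∧ x.2 ≠ y.2 then (st.1, st.2.1, st.2.2.1 + 1, st.2.2.2)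
  else if x.1 = y.1 ∧ x.2 ≠ y.2 then (st.1, st.2.1, st.2.2.1, st.2.2.2 + 1)
  else st

def pvH (l : List (Int × Int)) (st : Int × Int × Int × Int) : Int × Int × Int × Int :=
  l.foldl (fun st y => pvStep (l.headD (0, 0)) y st) st

def pvQuad : List (Int × Int) → Int × Int × Int × Int → Int × Int × Int × Int
  | [], st => st
  | x :: t, st => pvQuad t ((x :: t).foldl (fun st y => pvStep x y st) st)

def pvG {α : Type} [BEq α] : List α → Int
  | [] => 0
  | x :: t => 1 + (t.count x : Int) + pvG t

theorem pvTri_succ (c : Nat) : pyTri ((c + 1 : Nat) : Int) = pyTri (c : Int) + ((c : Int) + 1) := by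
  unfold pyTri
  have h1 : ((c + 1 : Nat) : Int) * (((c + 1 : Nat) : Int) + 1) = (((c + 1) * (c + 2) : Nat) : Int) := by push_cast; ring
  have h2 : ((c : Nat) : Int) * (((c : Nat) : Int) + 1) = ((c * (c + 1) : Nat) : Int) := by push_cast; ring
  rw [h1, h2]
  rw [show ((2 : Int)) = ((2 : Nat) : Int) from rfl, PySem.Int.floordiv_natCast, PySem.Int.floordiv_natCast]
  have h3 : (c + 1) * (c + 2) = c * (c + 1) + (c + 1) * 2 := by ring
  rw [h3, Nat.add_mul_div_right _ _ (by omega : 0 < 2)]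
  push_cast; ring

theorem pvSum_tri_count {α : Type} [BEq α] [LawfulBEq α] (L : List α) :
    ∀ (S : List α), S.Nodup → (∀ k, k ∈ L → k ∈ S) →
    (S.map (fun k => pyTri ((L.count k : Nat) : Int))).sum = pvG L := by
  induction L with
  | nil =>
    intro S _ _
    have : ∀ k ∈ S, pyTri ((List.count k ([] : List α) : Nat) : Int) = 0 := by
      intro k _; simp [pyTri, PySem.Int.floordiv]
    rw [List.map_congr_left this]
    simp [pvG]
  | cons x t ih =>
    intro S hnd hsub
    have hx : x ∈ S := hsub x (List.mem_cons_self)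
    obtain ⟨s1, s2, rfl⟩ := List.append_of_mem hx
    have hnd' := hnd
    rw [List.nodup_middle, List.nodup_cons, List.mem_append] at hnd'
    have hxs1 : x ∉ s1 := fun hm => hnd'.1 (Or.inl hm)
    have hx2 : x ∉ s2 := fun hm => hnd'.1 (Or.inr hm)
    have hcnt_ne : ∀ k, k ≠ x → List.count k (x :: t) = List.count k t := by
      intro k hk
      rw [List.count_cons]
      simp [beq_iff_eq, Ne.symm hk]
    have h1 : ∀ k ∈ s1, pyTri ((List.count k (x :: t) : Nat) : Int) = pyTri ((List.count k t : Nat) : Int) := by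
      intro k hk; rw [hcnt_ne k (fun he => hxs1 (he ▸ hk))]
    have h2 : ∀ k ∈ s2, pyTri ((List.count k (x :: t) : Nat) : Int) = pyTri ((List.count k t : Nat) : Int) := by
      intro k hk; rw [hcnt_ne k (fun he => hx2 (he ▸ hk))]
    have hmid : List.count x (x :: t) = List.count x t + 1 := by
      rw [List.count_cons]; simp
    have hsub' : ∀ k, k ∈ t → k ∈ s1 ++ x :: s2 := fun k hk => hsub k (List.mem_cons_of_mem _ hk)
    have := ih (s1 ++ x :: s2) hnd hsub'
    simp only [List.map_append, List.sum_append, List.map_cons, List.sum_cons] at this ⊢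
    rw [List.map_congr_left h1, List.map_congr_left h2, hmid, pvTri_succ]
    simp only [pvG]
    linarith [this]

theorem pvFoldStep (x : Int × Int) (t : List (Int × Int)) : ∀ a b c d : Int,
    t.foldl (fun st y => pvStep x y st) (a, b, c, d) =
      (a + (t.countP (fun y => decide (x.1 = y.1 ∧ x.2 = y.2)) : Int),
       b + (t.countP (fun y => decide (¬x.1 = y.1 ∧ x.2 = y.2)) : Int),
       c + (t.countP (fun y => decide (¬x.1 = y.1 ∧ ¬x.2 = y.2)) : Int),
       d + (t.countP (fun y => decide (x.1 = y.1 ∧ ¬x.2 = y.2)) : Int)) := by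
  induction t with
  | nil => intro a b c d; simp
  | cons y t ih =>
    intro a b c d
    rw [List.foldl_cons]
    by_cases h1 : x.1 = y.1 <;> by_cases h2 : x.2 = y.2 <;>
      [ (have hs : pvStep x y (a, b, c, d) = (a + 1, b, c, d) := by simp [pvStep, h1, h2]);
        (have hs : pvStep x y (a, b, c, d) = (a, b, c, d + 1) := by simp [pvStep, h1, h2]);
        (have hs : pvStep x y (a, b, c, d) = (a, b + 1, c, d) := by simp [pvStep, h1, h2]);
        (have hs : pvStep x y (a, b, c, d) = (a, b, c + 1, d) := by simp [pvStep, h1, h2])] <;>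
      rw [hs, ih] <;> simp [h1, h2, Prod.ext_iff] <;> omega

theorem pvCountP_split (t : List (Int × Int)) (p q : (Int × Int) → Prop)
    [DecidablePred p] [DecidablePred q] :
    t.countP (fun y => decide (p y)) =
      t.countP (fun y => decide (p y ∧ q y)) + t.countP (fun y => decide (p y ∧ ¬ q y)) := by
  induction t with
  | nil => simp
  | cons y t ih =>
    simp only [List.countP_cons, ih]
    by_cases hp : p y <;> by_cases hq : q y <;> simp [hp, hq] <;> omega

theorem pvQuad_eq (L : List (Int × Int)) : ∀ a b c d : Int,
    pvQuad L (a, b, c, d) =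
      (a + pvG L,
       b + (pvG (L.map Prod.snd) - pvG L),
       c + (pyTri (L.length : Int) - pvG (L.map Prod.fst) - pvG (L.map Prod.snd) + pvG L),
       d + (pvG (L.map Prod.fst) - pvG L)) := by
  induction L with
  | nil => intro a b c d; simp [pvQuad, pvG, pyTri, PySem.Int.floordiv]
  | cons x t ih =>
    intro a b c d
    have hxx : pvStep x x (a, b, c, d) = (a + 1, b, c, d) := by simp [pvStep]
    simp only [pvQuad, List.foldl_cons, hxx, pvFoldStep, ih]
    -- abbreviations for the four counts over t
    have hcEq : t.count x = t.countP (fun y => decide (x.1 = y.1 ∧ x.2 = y.2)) := by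
      unfold List.count
      refine List.countP_congr (fun y _ => ?_)
      constructor
      · intro hb; have := eq_of_beq hb; subst this; simp
      · intro hb
        obtain ⟨h1, h2⟩ := of_decide_eq_true hb
        exact beq_iff_eq.mpr (Prod.ext h1.symm h2.symm)
    have hc2 : (t.map Prod.snd).count x.2 =
        t.countP (fun y => decide (x.1 = y.1 ∧ x.2 = y.2)) +
        t.countP (fun y => decide (¬x.1 = y.1 ∧ x.2 = y.2)) := by
      unfold List.count
      rw [List.countP_map]
      rw [List.countP_congr (q := fun y => decide (x.2 = y.2))
            (fun y _ => by simp only [Function.comp_apply, beq_iff_eq, decide_eq_true_eq]; exact eq_comm)]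
      rw [pvCountP_split t (fun y => x.2 = y.2) (fun y => x.1 = y.1)]
      congr 1
      · exact List.countP_congr (fun y _ => by simp only [decide_eq_true_eq]; exact and_comm)
      · exact List.countP_congr (fun y _ => by simp only [decide_eq_true_eq]; exact and_comm)
    have hc1 : (t.map Prod.fst).count x.1 =
        t.countP (fun y => decide (x.1 = y.1 ∧ x.2 = y.2)) +
        t.countP (fun y => decide (x.1 = y.1 ∧ ¬x.2 = y.2)) := by
      unfold List.count
      rw [List.countP_map]
      rw [List.countP_congr (q := fun y => decide (x.1 = y.1))
            (fun y _ => by simp only [Function.comp_apply, beq_iff_eq, decide_eq_true_eq]; exact eq_comm)]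
      exact pvCountP_split t (fun y => x.1 = y.1) (fun y => x.2 = y.2)
    have hlen : t.length =
        (t.countP (fun y => decide (x.1 = y.1 ∧ x.2 = y.2)) +
         t.countP (fun y => decide (x.1 = y.1 ∧ ¬x.2 = y.2))) +
        (t.countP (fun y => decide (¬x.1 = y.1 ∧ x.2 = y.2)) +
         t.countP (fun y => decide (¬x.1 = y.1 ∧ ¬x.2 = y.2))) := by
      rw [List.length_eq_countP_add_countP (fun y => decide (x.1 = y.1))]
      congr 1
      · exact pvCountP_split t (fun y => x.1 = y.1) (fun y => x.2 = y.2)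
      · rw [List.countP_congr (q := fun y => decide (¬x.1 = y.1)) (fun y _ => by simp only [decide_eq_true_eq, decide_not, Bool.not_eq_true', decide_eq_false_iff_not])]
        exact pvCountP_split t (fun y => ¬x.1 = y.1) (fun y => x.2 = y.2)
    have htri : pyTri ((t.length + 1 : Nat) : Int) = pyTri (t.length : Int) + ((t.length : Int) + 1) :=
      pvTri_succ t.length
    simp only [pvG, List.map_cons, List.length_cons]
    rw [Prod.ext_iff, Prod.ext_iff, Prod.ext_iff]
    refine ⟨?_, ?_, ?_, ?_⟩ <;> simp only [] <;>
      (try rw [htri]) <;> push_cast [hcEq, hc2, hc1] <;> linarith [hlen]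

theorem pvT_fold (L : List (Int × Int)) : ∀ st,
    (L.tails.dropLast).foldl (fun st l => pvH l st) st = pvQuad L st := by
  induction L with
  | nil => intro st; simp [pvQuad]
  | cons x t ih =>
    intro st
    have hne : t.tails ≠ [] := List.ne_nil_of_length_pos (by simp [List.length_tails])
    rw [List.tails_cons, List.dropLast_cons_of_ne_nil hne, List.foldl_cons]
    rw [ih]
    simp [pvQuad, pvH]

theorem pvNest (classes clusters : List Int) (h : classes.length ≤ clusters.length) :
    (PySem.List.pyRange 0 (classes.length : Int)).foldl
      (fun (st : Int × Int × Int × Int) i =>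
        (PySem.List.pyRange i (classes.length : Int)).foldl
          (fun (st : Int × Int × Int × Int) j =>
            if PySem.List.pyGetD classes i 0 = PySem.List.pyGetD classes j 0 ∧
               PySem.List.pyGetD clusters i 0 = PySem.List.pyGetD clusters j 0 then
              (st.1 + 1, st.2.1, st.2.2.1, st.2.2.2)
            else if PySem.List.pyGetD classes i 0 ≠ PySem.List.pyGetD classes j 0 ∧
                    PySem.List.pyGetD clusters i 0 = PySem.List.pyGetD clusters j 0 then
              (st.1, st.2.1 + 1, st.2.2.1, st.2.2.2)
            else if PySem.List.pyGetD classes i 0 ≠ PySem.List.pyGetD classes j 0 ∧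
                    PySem.List.pyGetD clusters i 0 ≠ PySem.List.pyGetD clusters j 0 then
              (st.1, st.2.1, st.2.2.1 + 1, st.2.2.2)
            else if PySem.List.pyGetD classes i 0 = PySem.List.pyGetD classes j 0 ∧
                    PySem.List.pyGetD clusters i 0 ≠ PySem.List.pyGetD clusters j 0 then
              (st.1, st.2.1, st.2.2.1, st.2.2.2 + 1)
            else st) st) ((0, 0, 0, 0) : Int × Int × Int × Int)
    = pvQuad (classes.zip clusters) (0, 0, 0, 0) := by
  have hmin : (classes.zip clusters).length = classes.length := by
    simp [List.length_zip]; omega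
  set pz := classes.zip clusters with hpz
  have hget : ∀ k : Int, 0 ≤ k → k < (pz.length : Int) →
      PySem.List.pyGetD classes k 0 = (PySem.List.pyGetD pz k ((0 : Int), (0 : Int))).1 ∧
      PySem.List.pyGetD clusters k 0 = (PySem.List.pyGetD pz k ((0 : Int), (0 : Int))).2 := by
    intro k hk0 hk
    have hkn : k.toNat < pz.length := by omega
    have h1 : k.toNat < classes.length := by omega
    have h2 : k.toNat < clusters.length := by omega
    rw [PySem.List.pyGetD_of_nonneg _ _ hk0, PySem.List.pyGetD_of_nonneg _ _ hk0,
        PySem.List.pyGetD_of_nonneg _ _ hk0]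
    rw [List.getD_eq_getElem _ _ hkn, List.getD_eq_getElem _ _ h1, List.getD_eq_getElem _ _ h2]
    simp [hpz, List.getElem_zip]
  have hn : (classes.length : Int) = PySem.List.len pz := by simp [PySem.List.len, hmin]
  rw [hn]
  rw [PySem.List.foldl_congr_mem' _ _
        (fun (st : Int × Int × Int × Int) i =>
          pvH (PySem.List.pyGetD (pz.tails.dropLast) i []) st) _ ?_]
  · have hTlen : PySem.List.len pz = PySem.List.len (pz.tails.dropLast) := by
      simp [PySem.List.len, List.length_dropLast, List.length_tails]
    rw [hTlen, PySem.List.foldl_pyRange_pyGetD (pz.tails.dropLast) []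
          (fun st l => pvH l st) _ (le_refl 0)]
    simp only [Int.toNat_zero, List.drop_zero]
    exact pvT_fold pz _
  · intro i hi st
    rw [PySem.List.mem_pyRange_one] at hi
    obtain ⟨hi0, hilt⟩ := hi
    have hilt' : i < (pz.length : Int) := by simpa [PySem.List.len] using hilt
    have hin : i.toNat < pz.length := by omega
    -- inner: replace index reads, then collapse the range fold to a fold over the tail
    rw [PySem.List.foldl_congr_mem' _ _
          (fun (st : Int × Int × Int × Int) j =>
            pvStep (PySem.List.pyGetD pz i ((0 : Int), (0 : Int)))
                   (PySem.List.pyGetD pz j ((0 : Int), (0 : Int))) st) _ ?_]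
    · rw [PySem.List.foldl_pyRange_pyGetD pz ((0 : Int), (0 : Int))
            (fun st y => pvStep (PySem.List.pyGetD pz i ((0 : Int), (0 : Int))) y st) _ hi0]
      have hTi : PySem.List.pyGetD (pz.tails.dropLast) i [] = pz.drop i.toNat := by
        have hlt : i.toNat < (pz.tails.dropLast).length := by
          simp [List.length_dropLast, List.length_tails]; omega
        rw [PySem.List.pyGetD_of_nonneg _ _ hi0, List.getD_eq_getElem _ _ hlt,
            List.getElem_dropLast]
        exact List.getElem_tails ..
      have hhead : (pz.drop i.toNat).headD ((0 : Int), (0 : Int))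
          = PySem.List.pyGetD pz i ((0 : Int), (0 : Int)) := by
        rw [List.drop_eq_getElem_cons hin, PySem.List.pyGetD_of_nonneg _ _ hi0,
            List.getD_eq_getElem _ _ hin]
        rfl
      simp only [pvH, hTi, hhead]
    · intro j hj st
      rw [PySem.List.mem_pyRange_one] at hj
      obtain ⟨hj0, hjlt⟩ := hj
      have hj0' : (0 : Int) ≤ j := le_trans hi0 hj0
      have hjlt' : j < (pz.length : Int) := by simpa [PySem.List.len] using hjlt
      obtain ⟨hci, hui⟩ := hget i hi0 hilt'
      obtain ⟨hcj, huj⟩ := hget j hj0' hjlt'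
      rw [hci, hui, hcj, huj]
      rfl

theorem pvA_eq (classes clusters : List Int) (h : classes.length ≤ clusters.length) :
    confusionMatrix classes clusters =
      [(pvQuad (classes.zip clusters) (0, 0, 0, 0)).1,
       (pvQuad (classes.zip clusters) (0, 0, 0, 0)).2.1,
       (pvQuad (classes.zip clusters) (0, 0, 0, 0)).2.2.1,
       (pvQuad (classes.zip clusters) (0, 0, 0, 0)).2.2.2] := by
  unfold confusionMatrix
  dsimp only
  rw [pvNest classes clusters h]

-- values of a counting loop: one sum per distinct key

theorem pvCounterSum {α : Type} [BEq α] [LawfulBEq α] [DecidableEq α] (xs : List α) :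
    ((xs.foldl (fun d x => d.insert x (d.getD x 0 + 1)) PySem.Dict.empty).values.map pyTri).sum
      = pvG xs := by
  rw [PySem.Dict.foldl_insert_getD_add_one_eq_counter]
  have hv : (PySem.Dict.counter xs).values
      = (PySem.Set.ofList xs).map (fun k => ((xs.count k : Nat) : Int)) := by
    simp only [PySem.Dict.values, PySem.Dict.items_counter, List.map_map]
    rfl
  rw [hv, List.map_map]
  exact pvSum_tri_count xs (PySem.Set.ofList xs) (PySem.Set.nodup_ofList xs)
    (fun k hk => (PySem.Set.mem_ofList xs k).mpr hk)

theorem pvB_eq (classes clusters : List Int) :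
    confusionMatrix_alt classes clusters =
      [pvG (classes.zip clusters),
       pvG ((classes.zip clusters).map Prod.snd) - pvG (classes.zip clusters),
       pyTri (((classes.zip clusters).length : Nat) : Int)
         - pvG ((classes.zip clusters).map Prod.fst) - pvG ((classes.zip clusters).map Prod.snd)
         + pvG (classes.zip clusters),
       pvG ((classes.zip clusters).map Prod.fst) - pvG (classes.zip clusters)] := by
  unfold confusionMatrix_alt
  dsimp only
  set pairs := classes.zip clusters with hpairs
  rw [PySem.List.foldl_prod_mk
        (f := fun (d : PySem.Dict (Int × Int) Int) p => d.insert p (d.getD p 0 + 1))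
        (g := fun (s : PySem.Dict Int Int × PySem.Dict Int Int) p =>
          (s.1.insert p.1 (s.1.getD p.1 0 + 1), s.2.insert p.2 (s.2.getD p.2 0 + 1)))]
  rw [PySem.List.foldl_prod_mk
        (f := fun (d : PySem.Dict Int Int) (p : Int × Int) => d.insert p.1 (d.getD p.1 0 + 1))
        (g := fun (d : PySem.Dict Int Int) (p : Int × Int) => d.insert p.2 (d.getD p.2 0 + 1))]
  have h1 : pairs.foldl (fun (d : PySem.Dict Int Int) (p : Int × Int) => d.insert p.1 (d.getD p.1 0 + 1)) PySem.Dict.empty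
      = (pairs.map Prod.fst).foldl (fun d x => d.insert x (d.getD x 0 + 1)) PySem.Dict.empty := by
    rw [List.foldl_map]
  have h2 : pairs.foldl (fun (d : PySem.Dict Int Int) (p : Int × Int) => d.insert p.2 (d.getD p.2 0 + 1)) PySem.Dict.empty
      = (pairs.map Prod.snd).foldl (fun d x => d.insert x (d.getD x 0 + 1)) PySem.Dict.empty := by
    rw [List.foldl_map]
  simp only [h1, h2, pvCounterSum]

-- ===== VERDICT (by name: the statement is the Claim_ definition above) =====
theorem confusionMatrix_spec : Claim_equal_confusionMatrix := by
  intro classes clusters _ hpre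
  unfold Spec_confusionMatrix
  rw [pvA_eq classes clusters hpre, pvB_eq, pvQuad_eq]
  simp
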